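-- pv_equiv track=rewrite | github.com/gouhaoshuang/PapperProcess | 99_System/scripts/librarian/content_extractor.py | _get_first_paragraphs
-- ===== SOURCE A (Python) =====
-- def _get_first_paragraphs(text: str, max_words: int) -> str:
--     """
--     获取前 N 个单词
--
--     Args:
--         text: 文本内容
--         max_words: 最大单词数
--
--     Returns:
--         截取的文本
--     """
--     # 跳过可能的标题和元数据
--     lines = text.split("\n")
--     content_lines = []
--     in_content = False
--
--     for line in lines:
--         # 跳过标题和空行
--         if not in_content:
--             if line.strip() and not line.startswith("#"):
--                 in_content = True
--         if in_content:
--             content_lines.append(line)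
--
--     content = " ".join(content_lines)
--     words = content.split()[:max_words]
--     return " ".join(words)
-- ===== SOURCE B (Python) =====
-- def _get_first_paragraphs(text: str, max_words: int) -> str:
--     # Peel header lines (blank or '#'-prefixed) off the front of the RAW string
--     # with partition, then tokenize the remaining raw text directly with
--     # whitespace split -- no line list and no " ".join of lines is ever built
--     # (correct because "\n" is itself whitespace for str.split()).
--     while True:
--         head, sep, rest = text.partition("\n")
--         if head.strip() and not head.startswith("#"):
--             break
--         if not sep:
--             return ""
--         text = rest
--     return " ".join(text.split()[:max_words])
-- ===== Notes on version B (the rewrite author's own statement) =====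
-- stated objective: alternative
-- what changed: B never builds the list of lines or re-joins them: it peels header lines off the front of the raw string with str.partition in a while loop and then whitespace-tokenizes the remaining raw text directly (valid because '\n' is whitespace for str.split()), where A folds over text.split('\n') with an in_content flag and joins the accumulated lines before splitting.
import Mathlib
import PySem

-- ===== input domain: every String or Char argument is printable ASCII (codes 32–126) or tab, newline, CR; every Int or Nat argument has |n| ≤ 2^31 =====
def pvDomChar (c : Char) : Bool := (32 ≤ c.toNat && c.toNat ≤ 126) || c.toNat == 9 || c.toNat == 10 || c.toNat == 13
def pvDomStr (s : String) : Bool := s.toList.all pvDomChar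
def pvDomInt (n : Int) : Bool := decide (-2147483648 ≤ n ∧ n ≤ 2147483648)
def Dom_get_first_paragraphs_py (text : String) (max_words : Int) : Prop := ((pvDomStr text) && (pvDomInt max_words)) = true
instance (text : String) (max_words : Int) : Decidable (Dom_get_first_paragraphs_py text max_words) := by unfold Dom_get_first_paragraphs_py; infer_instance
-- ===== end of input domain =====

-- B replaces A's in_content flag fold over text.split("\n") (accumulate lines, re-join, split)
-- by peeling header lines off the RAW character stream with partition("\n") and tokenizing the
-- remaining raw text directly with whitespace split (alternative decomposition; same cost).

-- ===== PORT A =====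
-- loop body of A's `for line in lines` with state (in_content, content_lines)
def pvAStep (s : Bool × List String) (line : String) : Bool × List String :=
  let inC := s.1 || (decide (PySem.Str.strip line ≠ "") && !(PySem.Str.startswith line "#"))
  (inC, if inC then s.2 ++ [line] else s.2)

def get_first_paragraphs_py (text : String) (max_words : Int) : String :=
  let lines := (PySem.Str.split? text "\n").getD []
  let st := lines.foldl pvAStep (false, [])
  let content := PySem.Str.join " " st.2
  let words := PySem.List.slice (PySem.Str.split₀ content) none (some max_words)
  PySem.Str.join " " words

-- ===== PORT B =====
-- head/rest of text.partition("\n") at character level (none = no '\n' left, i.e. sep == "")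
def pvPartNl : List Char → List Char × Option (List Char)
  | [] => ([], none)
  | c :: cs =>
      if c = '\n' then ([], some cs)
      else
        let p := pvPartNl cs
        (c :: p.1, p.2)

theorem pvPartNl_rest_lt : ∀ (cs rest : List Char), (pvPartNl cs).2 = some rest → rest.length < cs.length := by
  intro cs
  induction cs with
  | nil => intro rest h; simp [pvPartNl] at h
  | cons c cs ih =>
      intro rest h
      by_cases hc : c = '\n'
      · simp [pvPartNl, hc] at h
        rw [List.length_cons, ← h]
        exact Nat.lt_succ_self _
      · simp [pvPartNl, hc] at h
        rw [List.length_cons]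
        exact Nat.lt_succ_of_lt (ih rest h)

-- the while loop of Source B: peel header lines; `some cs` = raw text at the break, `none` = the `return ""` exit
def pvPeel (cs : List Char) : Option (List Char) :=
  let p := pvPartNl cs
  if decide (PySem.Chars.strip p.1 ≠ []) && !PySem.Chars.startswith p.1 ['#'] then some cs
  else
    match h : p.2 with
    | none => none
    | some rest => pvPeel rest
termination_by cs.length
decreasing_by exact pvPartNl_rest_lt cs rest h

-- `" ".join(text.split()[:max_words])` of Source B, exact at code-point level via PySem.Chars
def get_first_paragraphs_py_alt (text : String) (max_words : Int) : String :=
  match pvPeel text.toList with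
  | none => ""
  | some cs =>
      String.ofList (PySem.Chars.join [' ']
        (PySem.List.slice (PySem.Chars.split₀ cs) none (some max_words)))

-- ===== PRECONDITION & SPEC =====
def Spec_get_first_paragraphs_py (text : String) (max_words : Int) (out : String) : Prop := out = get_first_paragraphs_py_alt text max_words
instance (text : String) (max_words : Int) (out : String) : Decidable (Spec_get_first_paragraphs_py text max_words out) := by unfold Spec_get_first_paragraphs_py; infer_instance

-- ===== CLAIM (what is proved, stated in full; the proofs are below) =====
def Claim_equal_get_first_paragraphs_py : Prop := ∀ (text : String) (max_words : Int), Dom_get_first_paragraphs_py text max_words → Spec_get_first_paragraphs_py text max_words (get_first_paragraphs_py text max_words)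

-- ===== LEMMAS AND PROOFS =====

-- step lemmas for pvPeel (one unfolding each)
theorem pvPeel_content (cs : List Char)
    (h : (decide (PySem.Chars.strip (pvPartNl cs).1 ≠ []) && !PySem.Chars.startswith (pvPartNl cs).1 ['#']) = true) :
    pvPeel cs = some cs := by
  rw [pvPeel, h]
  simp

theorem pvPeel_last (cs : List Char)
    (h : (decide (PySem.Chars.strip (pvPartNl cs).1 ≠ []) && !PySem.Chars.startswith (pvPartNl cs).1 ['#']) = false)
    (hr : (pvPartNl cs).2 = none) :
    pvPeel cs = none := by
  rw [pvPeel, h]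
  simp only [Bool.false_eq_true, if_false]
  split <;> simp_all

theorem pvPeel_step (cs r : List Char)
    (h : (decide (PySem.Chars.strip (pvPartNl cs).1 ≠ []) && !PySem.Chars.startswith (pvPartNl cs).1 ['#']) = false)
    (hr : (pvPartNl cs).2 = some r) :
    pvPeel cs = pvPeel r := by
  rw [pvPeel, h]
  simp only [Bool.false_eq_true, if_false]
  split <;> simp_all

-- splitOn.go with sep = "\n": the accumulator moves out front
theorem pv_go_acc (fuel : Nat) : ∀ (l cur : List Char) (acc : List (List Char)),
    PySem.Chars.splitOn.go ['\n'] fuel l cur acc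
      = acc.reverse ++ PySem.Chars.splitOn.go ['\n'] fuel l cur [] := by
  induction fuel with
  | zero => intro l cur acc; simp [PySem.Chars.splitOn.go]
  | succ n ih =>
      intro l cur acc
      cases l with
      | nil => simp [PySem.Chars.splitOn.go]
      | cons c rest =>
          by_cases hpre : ['\n'].isPrefixOf (c :: rest) = true
          · simp only [PySem.Chars.splitOn.go, hpre, if_true, List.length_cons, List.drop_succ_cons,
              List.length_nil, List.drop_zero]
            rw [ih rest [] (cur.reverse :: acc), ih rest [] [cur.reverse]]
            simp
          · simp only [PySem.Chars.splitOn.go, hpre, Bool.false_eq_true, if_false]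
            exact ih rest (c :: cur) acc

-- one run of splitOn.go with exact fuel = length + 1, phrased through pvPartNl
theorem pv_go_run : ∀ (l cur : List Char),
    PySem.Chars.splitOn.go ['\n'] (l.length + 1) l cur []
      = (cur.reverse ++ (pvPartNl l).1)
          :: (match (pvPartNl l).2 with
              | none => []
              | some r => PySem.Chars.splitOn.go ['\n'] (r.length + 1) r [] []) := by
  intro l
  induction l with
  | nil => intro cur; simp [PySem.Chars.splitOn.go, pvPartNl]
  | cons c rest ih =>
      intro cur
      by_cases hc : c = '\n'
      · have hpre : ['\n'].isPrefixOf (c :: rest) = true := by simp [List.isPrefixOf, hc]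
        simp only [List.length_cons, PySem.Chars.splitOn.go, hpre, if_true, List.drop_succ_cons,
          List.length_nil, List.drop_zero]
        rw [pv_go_acc]
        simp [pvPartNl, hc]
      · have hpre : ¬ (['\n'].isPrefixOf (c :: rest) = true) := by
          simp [List.isPrefixOf]
          intro h
          exact hc h.symm
        simp only [List.length_cons, PySem.Chars.splitOn.go, hpre, Bool.false_eq_true, if_false]
        rw [ih (c :: cur)]
        simp [pvPartNl, hc]

-- splitOn with "\n" recurses along pvPartNl
theorem pv_splitOn_nl (cs : List Char) :
    PySem.Chars.splitOn cs ['\n']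
      = (pvPartNl cs).1
          :: (match (pvPartNl cs).2 with
              | none => []
              | some r => PySem.Chars.splitOn r ['\n']) := by
  show PySem.Chars.splitOn.go ['\n'] (cs.length + 1) cs [] [] = _
  rw [pv_go_run]
  rfl

-- pvPartNl really is a partition of the string at the first '\n'
theorem pv_partNl_eq (cs : List Char) :
    cs = (pvPartNl cs).1 ++ (match (pvPartNl cs).2 with | none => [] | some r => '\n' :: r) := by
  induction cs with
  | nil => simp [pvPartNl]
  | cons c rest ih =>
      by_cases hc : c = '\n'
      · simp [pvPartNl, hc]
      · simp only [pvPartNl, hc, if_false]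
        simpa using ih

-- joining the '\n'-split back with '\n' restores the string
theorem pv_join_nl_aux : ∀ (n : Nat) (cs : List Char), cs.length ≤ n →
    PySem.Chars.join ['\n'] (PySem.Chars.splitOn cs ['\n']) = cs := by
  intro n
  induction n with
  | zero =>
      intro cs h
      have hnil : cs = [] := by cases cs <;> simp_all
      subst hnil
      rw [pv_splitOn_nl]
      simp [pvPartNl, PySem.Chars.join_singleton]
  | succ n ih =>
      intro cs h
      rw [pv_splitOn_nl]
      have hc := pv_partNl_eq cs
      rcases hr : (pvPartNl cs).2 with _ | r
      · have hc' : cs = (pvPartNl cs).1 := by rw [hr] at hc; simpa using hc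
        simpa [PySem.Chars.join_singleton] using hc'.symm
      · have hlt := pvPartNl_rest_lt cs r hr
        have hrec := ih r (by omega)
        have hc' : cs = (pvPartNl cs).1 ++ '\n' :: r := by rw [hr] at hc; simpa using hc
        show PySem.Chars.join ['\n'] ((pvPartNl cs).1 :: PySem.Chars.splitOn r ['\n']) = cs
        rcases hs : PySem.Chars.splitOn r ['\n'] with _ | ⟨q, qs⟩
        · rw [pv_splitOn_nl] at hs; simp at hs
        · rw [PySem.Chars.join_cons_cons, ← hs, hrec, List.append_assoc, List.singleton_append]
          exact hc'.symm

theorem pv_join_nl (cs : List Char) :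
    PySem.Chars.join ['\n'] (PySem.Chars.splitOn cs ['\n']) = cs :=
  pv_join_nl_aux cs.length cs le_rfl

-- characters equal, or both whitespace: split₀ cannot tell the strings apart
def pvR (a b : Char) : Prop := a = b ∨ (PySem.Chars.isspace a = true ∧ PySem.Chars.isspace b = true)

theorem pv_split₀_go_congr : ∀ {s t : List Char}, List.Forall₂ pvR s t →
    ∀ (cur : List Char) (acc : List (List Char)),
      PySem.Chars.split₀.go s cur acc = PySem.Chars.split₀.go t cur acc := by
  intro s t h
  induction h with
  | nil => intro cur acc; rfl
  | @cons a b as bs hab _ ih =>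
      intro cur acc
      rcases hab with rfl | ⟨ha, hb⟩
      · by_cases hw : PySem.Chars.isspace a = true <;>
          by_cases he : cur.isEmpty = true <;>
          simp [PySem.Chars.split₀.go, hw, he, ih]
      · by_cases he : cur.isEmpty = true <;>
          simp [PySem.Chars.split₀.go, ha, hb, he, ih]

theorem pv_forall₂_append {α : Type} {r : α → α → Prop} {a b u v : List α}
    (h1 : List.Forall₂ r a b) (h2 : List.Forall₂ r u v) : List.Forall₂ r (a ++ u) (b ++ v) := by
  induction h1 with
  | nil => exact h2
  | cons h _ ih => exact List.Forall₂.cons h ih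

theorem pv_join_forall₂ (c d : Char) (hc : PySem.Chars.isspace c = true)
    (hd : PySem.Chars.isspace d = true) :
    ∀ (ls : List (List Char)), List.Forall₂ pvR (PySem.Chars.join [c] ls) (PySem.Chars.join [d] ls) := by
  intro ls
  induction ls with
  | nil => simp [PySem.Chars.join_nil]
  | cons p rest ih =>
      cases rest with
      | nil =>
          simp only [PySem.Chars.join_singleton]
          exact List.forall₂_same.mpr (fun x _ => Or.inl rfl)
      | cons q qs =>
          rw [PySem.Chars.join_cons_cons, PySem.Chars.join_cons_cons]
          exact pv_forall₂_append
            (pv_forall₂_append (List.forall₂_same.mpr (fun x _ => (Or.inl rfl : pvR x x)))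
              (List.Forall₂.cons (Or.inr ⟨hc, hd⟩) List.Forall₂.nil)) ih

-- joining with ' ' or with '\n' yields the same whitespace tokens
theorem pv_split₀_join (ls : List (List Char)) :
    PySem.Chars.split₀ (PySem.Chars.join [' '] ls) = PySem.Chars.split₀ (PySem.Chars.join ['\n'] ls) := by
  show PySem.Chars.split₀.go _ [] [] = PySem.Chars.split₀.go _ [] []
  exact pv_split₀_go_congr (pv_join_forall₂ ' ' '\n' (by decide) (by decide) ls) [] []

-- a trailing [:max_words] slice commutes with map
theorem pv_map_slice {α β : Type} (f : α → β) (xs : List α) (b : Int) :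
    (PySem.List.slice xs none (some b)).map f = PySem.List.slice (xs.map f) none (some b) := by
  simp [PySem.List.slice, List.map_take]

-- once the flag is true, A's loop appends every remaining line
theorem pv_astep_true (ls : List String) : ∀ acc : List String,
    ls.foldl pvAStep (true, acc) = (true, acc ++ ls) := by
  induction ls with
  | nil => intro acc; simp
  | cons l ls ih =>
      intro acc
      simp only [List.foldl_cons, pvAStep, Bool.true_or]
      simpa using ih (acc ++ [l])

-- the header test of a line, at both levels
theorem pv_header_test (l : List Char) :
    (decide (PySem.Str.strip (String.ofList l) ≠ "") && !(PySem.Str.startswith (String.ofList l) "#"))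
      = (decide (PySem.Chars.strip l ≠ []) && !PySem.Chars.startswith l ['#']) := by
  have h1 : (PySem.Str.strip (String.ofList l) ≠ "") ↔ (PySem.Chars.strip l ≠ []) := by
    constructor
    · intro h hc
      apply h
      show String.ofList (PySem.Chars.strip (String.ofList l).toList) = ""
      rw [String.toList_ofList, hc]
    · intro h hc
      apply h
      have := congrArg String.toList hc
      rw [PySem.Str.strip, String.toList_ofList, String.toList_ofList] at this
      simpa using this
  have h2 : PySem.Str.startswith (String.ofList l) "#" = PySem.Chars.startswith l ['#'] := by
    simp [PySem.Str.startswith, String.toList_ofList]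
  rw [h2]
  congr 1
  exact decide_eq_decide.mpr h1

-- A's accumulated content_lines are exactly the lines of pvPeel's raw suffix
theorem pv_fold_peel_aux : ∀ (n : Nat) (cs : List Char), cs.length ≤ n →
    (((PySem.Chars.splitOn cs ['\n']).map String.ofList).foldl pvAStep (false, [])).2
      = match pvPeel cs with
        | none => []
        | some cs' => (PySem.Chars.splitOn cs' ['\n']).map String.ofList := by
  intro n
  induction n with
  | zero =>
      intro cs hlen
      have hnil : cs = [] := by cases cs <;> simp_all
      subst hnil
      rw [pvPeel_last [] (by decide) rfl]
      rfl
  | succ n ih =>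
      intro cs hlen
      rw [pv_splitOn_nl]
      rcases hcond : (decide (PySem.Chars.strip (pvPartNl cs).1 ≠ []) && !PySem.Chars.startswith (pvPartNl cs).1 ['#']) with _ | _
      · -- header line: flag stays false, first line dropped
        have hstep : pvAStep (false, []) (String.ofList (pvPartNl cs).1) = (false, []) := by
          simp only [pvAStep, Bool.false_or]
          rw [pv_header_test, hcond]
          simp
        rcases hr : (pvPartNl cs).2 with _ | r
        · rw [pvPeel_last cs hcond hr]
          simp only [List.map_cons, List.foldl_cons, hstep]
          simp
        · have hlt := pvPartNl_rest_lt cs r hr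
          rw [pvPeel_step cs r hcond hr]
          simp only [List.map_cons, List.foldl_cons, hstep]
          exact ih r (by omega)
      · -- content line: flag turns true, everything kept
        rw [pvPeel_content cs hcond]
        have hstep : pvAStep (false, []) (String.ofList (pvPartNl cs).1)
            = (true, [String.ofList (pvPartNl cs).1]) := by
          simp only [pvAStep, Bool.false_or]
          rw [pv_header_test, hcond]
          simp
        simp only [List.map_cons, List.foldl_cons, hstep]
        rw [pv_astep_true]
        rw [pv_splitOn_nl]
        simp

theorem pv_fold_peel (cs : List Char) :
    (((PySem.Chars.splitOn cs ['\n']).map String.ofList).foldl pvAStep (false, [])).2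
      = match pvPeel cs with
        | none => []
        | some cs' => (PySem.Chars.splitOn cs' ['\n']).map String.ofList :=
  pv_fold_peel_aux cs.length cs le_rfl

-- ===== VERDICT (by name: the statement is the Claim_ definition above) =====
theorem get_first_paragraphs_py_spec : Claim_equal_get_first_paragraphs_py := by
  intro text max_words _
  unfold Spec_get_first_paragraphs_py get_first_paragraphs_py get_first_paragraphs_py_alt
  have hlines : (PySem.Str.split? text "\n").getD []
      = (PySem.Chars.splitOn text.toList ['\n']).map String.ofList := by
    simp [PySem.Str.split?, PySem.Chars.split?]
  simp only [hlines]
  rw [pv_fold_peel]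
  rcases hp : pvPeel text.toList with _ | cs'
  · -- all header: A joins an empty list of lines
    simp [PySem.Str.join, PySem.Str.split₀, PySem.Chars.join_nil, PySem.Chars.split₀,
      PySem.Chars.split₀.go, PySem.List.slice]
  · -- content found: A's joined lines tokenize like B's raw suffix cs'
    have hchars : (PySem.Str.join " " ((PySem.Chars.splitOn cs' ['\n']).map String.ofList)).toList
        = PySem.Chars.join [' '] (PySem.Chars.splitOn cs' ['\n']) := by
      rw [PySem.Str.join, String.toList_ofList, List.map_map]
      congr 1
      rw [show (String.toList ∘ String.ofList) = (id : List Char → List Char) from funext (fun l => String.toList_ofList)]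
      exact List.map_id _
    have htok : PySem.Str.split₀ (PySem.Str.join " " ((PySem.Chars.splitOn cs' ['\n']).map String.ofList))
        = (PySem.Chars.split₀ cs').map String.ofList := by
      rw [PySem.Str.split₀, hchars, pv_split₀_join, pv_join_nl]
    rw [htok]
    rw [PySem.Str.join, ← pv_map_slice, List.map_map]
    rw [show (String.toList ∘ String.ofList) = (id : List Char → List Char) from funext (fun l => String.toList_ofList)]
    rw [List.map_id]
    rfl
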